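-- pv_equiv track=rewrite | github.com/wmakaben/AdventOfCode | d06.py | getOrbits
-- ===== SOURCE A (Python) =====
-- def getOrbits(g, key, total, visited):
-- 	if key in visited:
-- 		return visited[key]
-- 	elif key not in g:
-- 		visited[key] = 0
-- 		return visited[key]
-- 	else:
-- 		visited[key] = 1 + getOrbits(g, g[key], total, visited)
-- 		total[0] += visited[key]
-- 		return visited[key]
-- ===== SOURCE B (Python) =====
-- def getOrbits(g, key, total, visited):
--     if key in visited:
--         return visited[key]
--     chain = []
--     cur = key
--     while cur not in visited and cur in g:
--         chain.append(cur)
--         cur = g[cur]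
--     if cur in visited:
--         depth = visited[cur]
--     else:
--         visited[cur] = 0
--         depth = 0
--     for node in reversed(chain):
--         depth += 1
--         visited[node] = depth
--         total[0] += depth
--     return depth
-- ===== Notes on version B (the rewrite author's own statement) =====
-- stated objective: alternative
-- what changed: Replaced A's memoized recursion by an explicit iterative walk: collect the fresh chain of nodes going up, find the anchor depth, then unwind the chain in reverse assigning depths; no recursion.
import Mathlib
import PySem

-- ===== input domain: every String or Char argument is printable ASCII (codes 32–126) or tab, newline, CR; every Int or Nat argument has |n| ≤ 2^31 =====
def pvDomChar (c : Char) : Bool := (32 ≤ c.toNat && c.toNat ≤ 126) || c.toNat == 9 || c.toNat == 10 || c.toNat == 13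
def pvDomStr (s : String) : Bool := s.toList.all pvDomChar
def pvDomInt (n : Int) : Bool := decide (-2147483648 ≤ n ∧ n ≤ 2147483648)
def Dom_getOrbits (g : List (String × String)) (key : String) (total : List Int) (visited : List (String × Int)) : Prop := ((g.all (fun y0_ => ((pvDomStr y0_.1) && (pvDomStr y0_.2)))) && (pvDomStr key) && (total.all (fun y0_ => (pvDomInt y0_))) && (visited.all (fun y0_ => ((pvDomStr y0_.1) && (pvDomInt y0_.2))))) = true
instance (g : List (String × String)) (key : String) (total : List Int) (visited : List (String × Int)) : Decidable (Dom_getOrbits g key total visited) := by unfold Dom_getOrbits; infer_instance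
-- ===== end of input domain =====

-- B replaces A's memoized recursion by an explicit iterative walk up the chain followed by a
-- reverse unwinding pass (objective: alternative decomposition; same cost). Both A and B mutate
-- `total` and `visited` identically in Python; the equivalence proved here is about the RETURN value.

-- ===== PORT A =====
-- total[0] += v  (Python raises IndexError on an empty list there; such inputs are outside Pre_,
-- and the return value never depends on `total`)
def pvAddTotal (total : List Int) (v : Int) : List Int :=
  match total with
  | [] => []
  | t :: ts => (t + v) :: ts

-- A's recursion, made total with fuel (Pre_ guarantees the chain escapes within g.length + 1
-- steps, so the fuel is never exhausted on admitted inputs); threads (return, total, visited).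
def pvGoA (g : PySem.Dict String String) :
    Nat → String → List Int → PySem.Dict String Int → Int × List Int × PySem.Dict String Int
  | 0, _, total, visited => (0, total, visited)
  | n+1, key, total, visited =>
    if visited.contains key then (visited.getD key 0, total, visited)
    else
      match g.get? key with
      | none =>
        let visited := visited.insert key 0
        (visited.getD key 0, total, visited)
      | some nxt =>
        let r := pvGoA g n nxt total visited
        let visited := r.2.2.insert key (1 + r.1)
        let total := pvAddTotal r.2.1 (visited.getD key 0)
        (visited.getD key 0, total, visited)

def getOrbits (g : List (String × String)) (key : String) (total : List Int) (visited : List (String × Int)) : Int :=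
  (pvGoA (PySem.Dict.mk g) (g.length + 1) key total (PySem.Dict.mk visited)).1

-- ===== PORT B =====
-- the while loop: collect the fresh chain (nodes not in visited that are in g), return it with
-- the anchor node where the walk stopped; fuel = g.length + 1 (never exhausted under Pre_)
def pvCollect (g : PySem.Dict String String) (visited : PySem.Dict String Int) :
    Nat → String → List String × String
  | 0, cur => ([], cur)
  | n+1, cur =>
    if visited.contains cur = false then
      match g.get? cur with
      | some nxt =>
        let r := pvCollect g visited n nxt
        (cur :: r.1, r.2)
      | none => ([], cur)
    else ([], cur)

-- the for loop over reversed(chain): depth += 1; visited[node] = depth; total[0] += depth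
def pvWalk (chain : List String) (dep : Int) (total : List Int) (visited : PySem.Dict String Int) :
    Int × List Int × PySem.Dict String Int :=
  chain.foldl
    (fun s node =>
      let d := s.1 + 1
      let total := match s.2.1 with | [] => [] | t :: ts => (t + d) :: ts
      (d, total, s.2.2.insert node d))
    (dep, total, visited)

def getOrbits_alt (g : List (String × String)) (key : String) (total : List Int) (visited : List (String × Int)) : Int :=
  let gd := PySem.Dict.mk g
  let vd := PySem.Dict.mk visited
  if vd.contains key then vd.getD key 0
  else
    let r := pvCollect gd vd (g.length + 1) key
    let dep : Int := if vd.contains r.2 then vd.getD r.2 0 else 0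
    let vd' := if vd.contains r.2 then vd else vd.insert r.2 0
    (pvWalk r.1.reverse dep total vd').1

-- ===== PRECONDITION & SPEC =====
-- one step of the successor map of the orbit graph: none once the walk has terminated
-- (a node already in visited, or a node with no entry in g)
def pvStep (g : PySem.Dict String String) (visited : PySem.Dict String Int)
    (o : Option String) : Option String :=
  o.bind (fun k => if visited.contains k then none else g.get? k)

-- Pre_ excludes exactly the inputs where Python A raises: (a) the chain from key runs into a
-- cycle (> g.length steps without escaping ⇒ RecursionError), and (b) total = [] while key is a
-- fresh node of g (total[0] raises IndexError).
def Pre_getOrbits (g : List (String × String)) (key : String) (total : List Int) (visited : List (String × Int)) : Prop :=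
  (pvStep (PySem.Dict.mk g) (PySem.Dict.mk visited))^[g.length + 1] (some key) = none ∧
  ((PySem.Dict.mk visited).contains key = false → ((PySem.Dict.mk g).get? key).isSome → total ≠ [])

instance (g : List (String × String)) (key : String) (total : List Int) (visited : List (String × Int)) : Decidable (Pre_getOrbits g key total visited) := by unfold Pre_getOrbits; infer_instance

def pvWitness_getOrbits : (List (String × String)) × String × List Int × (List (String × Int)) :=
  ([("A", "B")], "A", [0], [])

def Spec_getOrbits (g : List (String × String)) (key : String) (total : List Int) (visited : List (String × Int)) (out : Int) : Prop := out = getOrbits_alt g key total visited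
instance (g : List (String × String)) (key : String) (total : List Int) (visited : List (String × Int)) (out : Int) : Decidable (Spec_getOrbits g key total visited out) := by unfold Spec_getOrbits; infer_instance

-- ===== CLAIM (what is proved, stated in full; the proofs are below) =====
def Claim_equal_getOrbits : Prop := ∀ (g : List (String × String)) (key : String) (total : List Int) (visited : List (String × Int)), Dom_getOrbits g key total visited → Pre_getOrbits g key total visited → Spec_getOrbits g key total visited (getOrbits g key total visited)

-- ===== LEMMAS AND PROOFS =====

-- recursive form of the escape condition, convenient for the induction below
def pvEscapes (g : PySem.Dict String String) (visited : PySem.Dict String Int) :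
    Nat → String → Bool
  | 0, _ => false
  | n+1, k =>
    if visited.contains k then true
    else
      match g.get? k with
      | none => true
      | some nxt => pvEscapes g visited n nxt

theorem pvEscapes_of_iterate (g : PySem.Dict String String) (visited : PySem.Dict String Int) :
    ∀ (n : Nat) (k : String), (pvStep g visited)^[n] (some k) = none →
      pvEscapes g visited n k = true := by
  intro n
  induction n with
  | zero => intro k h; simp at h
  | succ n ih =>
    intro k h
    rw [Function.iterate_succ_apply] at h
    simp only [pvEscapes]
    by_cases hv : visited.contains k
    · simp [hv]
    · simp only [hv, if_false, Bool.false_eq_true]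
      cases hg : g.get? k with
      | none => rfl
      | some nxt =>
        have hstep : pvStep g visited (some k) = some nxt := by
          simp [pvStep, hv, hg]
        rw [hstep] at h
        exact ih nxt h

-- the common functional specification: the depth of k (cache lookups against the ORIGINAL
-- visited, which is sound because A consults `visited` only on the way down, before any insert)
def pvDepth (g : PySem.Dict String String) (visited : PySem.Dict String Int) :
    Nat → String → Int
  | 0, _ => 0
  | n+1, k =>
    if visited.contains k then visited.getD k 0
    else
      match g.get? k with
      | none => 0
      | some nxt => 1 + pvDepth g visited n nxt

theorem pvGoA_fst (g : PySem.Dict String String) :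
    ∀ (n : Nat) (k : String) (total : List Int) (visited : PySem.Dict String Int),
      (pvGoA g n k total visited).1 = pvDepth g visited n k := by
  intro n
  induction n with
  | zero => intro k total visited; rfl
  | succ n ih =>
    intro k total visited
    simp only [pvGoA, pvDepth]
    by_cases h : visited.contains k
    · simp [h]
    · simp only [h, if_false, Bool.false_eq_true]
      cases hg : g.get? k with
      | none => simp [PySem.Dict.getD_insert_self]
      | some nxt => simp [PySem.Dict.getD_insert_self, ih nxt total visited]

theorem pvWalk_fst :
    ∀ (chain : List String) (dep : Int) (total : List Int) (visited : PySem.Dict String Int),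
      (pvWalk chain dep total visited).1 = dep + chain.length := by
  intro chain
  induction chain with
  | nil => intro dep total visited; simp [pvWalk]
  | cons x xs ih =>
    intro dep total visited
    simp only [pvWalk, List.foldl_cons] at *
    rw [ih]
    simp; omega

theorem pvDepth_eq_collect (g : PySem.Dict String String) (visited : PySem.Dict String Int) :
    ∀ (n : Nat) (k : String), pvEscapes g visited n k = true →
      pvDepth g visited n k =
        (if visited.contains (pvCollect g visited n k).2
          then visited.getD (pvCollect g visited n k).2 0 else 0)
        + (pvCollect g visited n k).1.length := by
  intro n
  induction n with
  | zero => intro k h; simp [pvEscapes] at h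
  | succ n ih =>
    intro k h
    simp only [pvEscapes] at h
    simp only [pvDepth, pvCollect]
    by_cases hv : visited.contains k
    · simp [hv]
    · simp only [hv, if_false, Bool.false_eq_true] at h ⊢
      cases hg : g.get? k with
      | none => simp [hv]
      | some nxt =>
        rw [hg] at h
        simp only [ih nxt h]
        simp; omega

-- ===== VERDICT (by name: the statement is the Claim_ definition above) =====
theorem getOrbits_spec : Claim_equal_getOrbits := by
  intro g key total visited _ hpre
  obtain ⟨hit, -⟩ := hpre
  have hesc := pvEscapes_of_iterate _ _ _ _ hit
  unfold Spec_getOrbits getOrbits getOrbits_alt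
  rw [pvGoA_fst]
  by_cases hv : (PySem.Dict.mk visited).contains key
  · simp only [hv, if_true]
    simp [pvDepth, hv]
  · simp only [hv, if_false, Bool.false_eq_true]
    rw [pvWalk_fst, List.length_reverse]
    exact pvDepth_eq_collect _ _ (g.length + 1) key hesc
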